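-- pv_equiv track=rewrite | github.com/Abdullahi-a-hussein/code_lines | ueler5.py | euler5
-- ===== SOURCE A (Python) =====
-- def is_prime(n):
--     if n == 2:
--         return True
--     first = 2
--     while first < n:
--         if n % first == 0:
--             return False
--         first += 1
--     return True
--
-- def euler5(n):
--     """Return the product of all prime numbers that are less than or equal to n"""
--     i = 2
--     product = 1
--     while i <= n:
--         if is_prime(i):
--             product *= i
--         i += 1
--     return product
-- ===== SOURCE B (Python) =====
-- def _gcd(a, b):
--     while b:
--         a, b = b, a % b
--     return a
--
-- def euler5(n):
--     """Return the product of all prime numbers that are less than or equal to n"""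
--     product = 1
--     for i in range(2, n + 1):
--         # i shares a factor with the product of all smaller primes iff i is composite
--         if _gcd(i, product) == 1:
--             product *= i
--     return product
-- ===== Notes on version B (the rewrite author's own statement) =====
-- stated objective: faster
-- what changed: Instead of trial-dividing each candidate by every smaller number, B keeps the running product of the primes found so far and tests each candidate with a single gcd against that product (a candidate >= 2 is composite iff it shares a factor with the product of the smaller primes).
import Mathlib
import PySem

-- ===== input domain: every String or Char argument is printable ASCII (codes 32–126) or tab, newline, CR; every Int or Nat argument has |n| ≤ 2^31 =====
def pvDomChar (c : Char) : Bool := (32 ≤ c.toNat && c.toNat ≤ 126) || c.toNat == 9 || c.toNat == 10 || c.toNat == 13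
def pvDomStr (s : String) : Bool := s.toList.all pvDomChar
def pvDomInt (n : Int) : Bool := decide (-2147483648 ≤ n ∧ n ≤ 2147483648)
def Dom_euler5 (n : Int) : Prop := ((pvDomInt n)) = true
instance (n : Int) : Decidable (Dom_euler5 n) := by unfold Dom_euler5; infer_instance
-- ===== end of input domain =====

-- B replaces A's per-number divisor scan by one gcd of each candidate with the running
-- product of the primes already found (a candidate is composite iff it shares a factor
-- with that product): same return value, measured faster.

-- ===== PORT A =====

-- is_prime's loop: while first < n: if n % first == 0: return False; first += 1
def euler5IsPrimeLoop (n first : Int) : Bool :=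
  if first < n then
    if PySem.Int.mod n first == 0 then false
    else euler5IsPrimeLoop n (first + 1)
  else true
termination_by (n - first).toNat
decreasing_by omega

def euler5IsPrime (n : Int) : Bool :=
  if n == 2 then true
  else euler5IsPrimeLoop n 2

-- euler5's loop: while i <= n: if is_prime(i): product *= i; i += 1
def euler5Loop (n i product : Int) : Int :=
  if i ≤ n then
    euler5Loop n (i + 1) (if euler5IsPrime i then product * i else product)
  else product
termination_by (n + 1 - i).toNat
decreasing_by omega

def euler5 (n : Int) : Int := euler5Loop n 2 1

-- ===== PORT B =====

-- _gcd: while b: a, b = b, a % b; return a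
def euler5AltGcd (a b : Int) : Int :=
  if b ≠ 0 then euler5AltGcd b (PySem.Int.mod a b)
  else a
termination_by b.natAbs
decreasing_by
  rename_i hb
  rcases lt_or_gt_of_ne hb with h | h
  · have := PySem.Int.mod_neg_bounds a h; omega
  · have h1 := PySem.Int.mod_nonneg a h; have h2 := PySem.Int.mod_lt a h; omega

def euler5_alt (n : Int) : Int :=
  (PySem.List.pyRange 2 (n + 1) 1).foldl
    (fun product i => if euler5AltGcd i product == 1 then product * i else product) 1

-- ===== PRECONDITION & SPEC =====
def Spec_euler5 (n : Int) (out : Int) : Prop := out = euler5_alt n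
instance (n : Int) (out : Int) : Decidable (Spec_euler5 n out) := by unfold Spec_euler5; infer_instance

-- ===== CLAIM (what is proved, stated in full; the proofs are below) =====
def Claim_equal_euler5 : Prop := ∀ (n : Int), Dom_euler5 n → Spec_euler5 n (euler5 n)

-- ===== LEMMAS AND PROOFS =====

-- product of all primes below k
def primored (k : Nat) : Nat :=
  match k with
  | 0 => 1
  | k + 1 => primored k * (if Nat.Prime k then k else 1)

theorem prime_dvd_primored {q k : Nat} (hq : Nat.Prime q) (h : q < k) : q ∣ primored k := by
  induction k with
  | zero => omega
  | succ k ih =>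
    simp only [primored]
    rcases Nat.lt_or_ge q k with h' | h'
    · exact Dvd.dvd.mul_right (ih h') _
    · have hqk : q = k := by omega
      subst hqk
      simp [hq]

theorem coprime_primored {p k : Nat} (hp : Nat.Prime p) (h : k ≤ p) :
    Nat.Coprime p (primored k) := by
  induction k with
  | zero => simp [primored, Nat.Coprime]
  | succ k ih =>
    simp only [primored]
    refine Nat.Coprime.mul_right (ih (by omega)) ?_
    split
    · rename_i hk
      exact (Nat.coprime_primes hp hk).mpr (by omega)
    · simp [Nat.Coprime]

theorem gcd_primored_eq_one_iff {i : Nat} (hi : 2 ≤ i) :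
    (Nat.gcd i (primored i) = 1 ↔ Nat.Prime i) := by
  constructor
  · intro h
    by_contra hnp
    have hq : Nat.Prime i.minFac := Nat.minFac_prime (by omega)
    have hdvd : i.minFac ∣ i := Nat.minFac_dvd i
    have hlt : i.minFac < i := by
      rcases Nat.lt_or_ge i.minFac i with h' | h'
      · exact h'
      · have heq : i.minFac = i := Nat.le_antisymm (Nat.le_of_dvd (by omega) hdvd) h'
        exact absurd (heq ▸ hq) hnp
    have h2 : i.minFac ∣ primored i := prime_dvd_primored hq hlt
    have h3 : i.minFac ∣ Nat.gcd i (primored i) := Nat.dvd_gcd hdvd h2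
    rw [h] at h3
    have := Nat.le_of_dvd (by omega) h3
    have := hq.two_le
    omega
  · intro hp
    exact coprime_primored hp (le_refl i)

-- A's inner loop decides "no divisor of n in [first, n)"
theorem isPrimeLoop_iff (n : Int) : ∀ (first : Int),
    (euler5IsPrimeLoop n first = true ↔ ∀ d : Int, first ≤ d → d < n → ¬ d ∣ n) := by
  intro first
  induction first using euler5IsPrimeLoop.induct n with
  | case1 first hlt hmod =>
    rw [euler5IsPrimeLoop, if_pos hlt, if_pos hmod]
    constructor
    · intro h; exact absurd h (by simp)
    · intro h
      exact absurd ((PySem.Int.mod_eq_zero_iff_dvd n first).mp (by simpa using hmod))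
        (h first le_rfl hlt)
  | case2 first hlt hmod ih =>
    rw [euler5IsPrimeLoop, if_pos hlt, if_neg hmod]
    rw [ih]
    constructor
    · intro h d hd1 hd2 hdvd
      by_cases hde : d = first
      · subst hde
        exact hmod (by simpa using (PySem.Int.mod_eq_zero_iff_dvd n d).mpr hdvd)
      · exact h d (by omega) hd2 hdvd
    · intro h d hd1 hd2
      exact h d (by omega) hd2
  | case3 first hlt =>
    rw [euler5IsPrimeLoop, if_neg hlt]
    constructor
    · intro _ d hd1 hd2; omega
    · intro _; rfl

-- A's primality test decides Nat.Prime on the loop's range 2 ≤ i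
theorem isPrime_iff_prime {i : Int} (hi : 2 ≤ i) :
    (euler5IsPrime i = true ↔ Nat.Prime i.toNat) := by
  unfold euler5IsPrime
  by_cases h2 : i = 2
  · subst h2; simp [Nat.prime_two]
  · simp only [beq_iff_eq, h2, if_false]
    rw [isPrimeLoop_iff]
    rw [Nat.prime_def_lt']
    constructor
    · intro h
      refine ⟨by omega, ?_⟩
      intro m hm hmlt hdvd
      have hni : ¬ ((m : Int) ∣ i) := h m (by omega) (by omega)
      refine hni ?_
      have := Int.natCast_dvd_natCast.mpr hdvd
      rwa [Int.toNat_of_nonneg (by omega)] at this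
    · rintro ⟨_, h⟩ d hd1 hd2 hdvd
      have hdn : d.toNat ∣ i.toNat := by
        refine Int.natCast_dvd_natCast.mp ?_
        rw [Int.toNat_of_nonneg (show (0:Int) ≤ d by omega),
            Int.toNat_of_nonneg (show (0:Int) ≤ i by omega)]
        exact hdvd
      exact h d.toNat (by omega) (by omega) hdn

-- B's hand-written Euclid computes Nat.gcd on nonnegative inputs
theorem altGcd_eq_gcd : ∀ (k : Nat) (b a : Int), 0 ≤ a → 0 ≤ b → b.toNat ≤ k →
    euler5AltGcd a b = (Nat.gcd a.toNat b.toNat : Int) := by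
  intro k
  induction k with
  | zero =>
    intro b a ha hb hk
    have hb0 : b = 0 := by omega
    subst hb0
    rw [euler5AltGcd]
    simp [Int.toNat_of_nonneg ha]
  | succ k ih =>
    intro b a ha hb hk
    by_cases hb0 : b = 0
    · subst hb0
      rw [euler5AltGcd]
      simp [Int.toNat_of_nonneg ha]
    · have hbpos : 0 < b := by omega
      rw [euler5AltGcd]
      simp only [hb0, ne_eq, not_false_iff, if_true]
      rw [PySem.Int.mod_eq_emod_of_pos hbpos]
      have hm0 : 0 ≤ a % b := Int.emod_nonneg a hb0
      have hmlt : a % b < b := Int.emod_lt_of_pos a hbpos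
      rw [ih (a % b) b hb hm0 (by omega)]
      congr 1
      have hcast : (a % b).toNat = a.toNat % b.toNat := by
        have : ((a.toNat % b.toNat : Nat) : Int) = a % b := by
          push_cast
          rw [Int.toNat_of_nonneg ha, Int.toNat_of_nonneg hb]
        omega
      rw [hcast, Nat.gcd_comm b.toNat]
      have hrec := Nat.gcd_rec b.toNat a.toNat
      rw [← hrec, Nat.gcd_comm]

-- the gcd test against the running product decides primality
theorem altGcd_primored {i : Int} (hi : 2 ≤ i) :
    ((euler5AltGcd i (primored i.toNat : Nat) == 1) = true ↔ Nat.Prime i.toNat) := by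
  rw [altGcd_eq_gcd (primored i.toNat) _ _ (by omega) (by positivity) (by simp)]
  rw [show ((primored i.toNat : Nat) : Int).toNat = primored i.toNat from by simp]
  rw [beq_iff_eq]
  rw [show ((Nat.gcd i.toNat (primored i.toNat) : Nat) : Int) = 1 ↔
      Nat.gcd i.toNat (primored i.toNat) = 1 from by omega]
  exact gcd_primored_eq_one_iff (by omega)

-- stepping the running product
theorem primored_step {i : Int} (hi : 2 ≤ i) :
    (primored (i + 1).toNat : Int) =
      (if Nat.Prime i.toNat then (primored i.toNat : Int) * i else (primored i.toNat : Int)) := by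
  have h1 : (i + 1).toNat = i.toNat + 1 := by omega
  rw [h1]
  simp only [primored]
  by_cases hp : Nat.Prime i.toNat
  · simp only [hp, if_true]
    push_cast
    rw [Int.toNat_of_nonneg (by omega)]
  · simp [hp]

-- A's loop carries the running product of primes up to the end
theorem loopA_eq (n : Int) : ∀ (k : Nat) (i : Int), 2 ≤ i → i ≤ n + 1 → (n + 1 - i).toNat = k →
    euler5Loop n i (primored i.toNat : Nat) = (primored (n + 1).toNat : Int) := by
  intro k
  induction k with
  | zero =>
    intro i h2 hle hk
    have : i = n + 1 := by omega
    subst this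
    rw [euler5Loop]
    simp only [show ¬ (n + 1 ≤ n) from by omega, if_false]
  | succ k ih =>
    intro i h2 hle hk
    have hin : i ≤ n := by omega
    rw [euler5Loop]
    simp only [hin, if_true]
    have hstep : (if euler5IsPrime i then (primored i.toNat : Int) * i else (primored i.toNat : Int))
        = (primored (i + 1).toNat : Int) := by
      rw [primored_step h2]
      by_cases hp : Nat.Prime i.toNat
      · rw [if_pos ((isPrime_iff_prime h2).mpr hp), if_pos hp]
      · rw [if_neg (fun h => hp ((isPrime_iff_prime h2).mp h)), if_neg hp]
    rw [hstep]
    exact ih (i + 1) (by omega) (by omega) (by omega)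

-- B's fold carries the same running product
theorem loopB_eq (n : Int) : ∀ (k : Nat) (i : Int), 2 ≤ i → i ≤ n + 1 → (n + 1 - i).toNat = k →
    (PySem.List.pyRange i (n + 1) 1).foldl
      (fun product j => if euler5AltGcd j product == 1 then product * j else product)
      (primored i.toNat : Nat) = (primored (n + 1).toNat : Int) := by
  intro k
  induction k with
  | zero =>
    intro i h2 hle hk
    have hi : i = n + 1 := by omega
    subst hi
    rw [PySem.List.pyRange_one]
    simp
  | succ k ih =>
    intro i h2 hle hk
    have hlt : i < n + 1 := by omega
    rw [PySem.List.pyRange_one_cons hlt]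
    rw [List.foldl_cons]
    have hstep : (if euler5AltGcd i (primored i.toNat : Nat) == 1
        then (primored i.toNat : Int) * i else (primored i.toNat : Int))
        = (primored (i + 1).toNat : Int) := by
      rw [primored_step h2]
      by_cases hp : Nat.Prime i.toNat
      · rw [if_pos ((altGcd_primored h2).mpr hp), if_pos hp]
      · rw [if_neg ?_, if_neg hp]
        intro h
        exact hp ((altGcd_primored h2).mp h)
    rw [hstep]
    exact ih (i + 1) (by omega) (by omega) (by omega)

-- ===== VERDICT (by name: the statement is the Claim_ definition above) =====
theorem euler5_spec : Claim_equal_euler5 := by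
  intro n _
  unfold Spec_euler5 euler5 euler5_alt
  by_cases hn : 1 ≤ n
  · have h1 : ((primored (2:Int).toNat : Nat) : Int) = 1 := by decide
    calc euler5Loop n 2 1
        = euler5Loop n 2 (primored (2:Int).toNat : Nat) := by rw [h1]
      _ = (primored (n + 1).toNat : Int) :=
          loopA_eq n (n + 1 - 2).toNat 2 (by omega) (by omega) rfl
      _ = (PySem.List.pyRange 2 (n + 1) 1).foldl
            (fun product j => if euler5AltGcd j product == 1 then product * j else product)
            (primored (2:Int).toNat : Nat) :=
          (loopB_eq n (n + 1 - 2).toNat 2 (by omega) (by omega) rfl).symm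
      _ = _ := by rw [h1]
  · rw [euler5Loop]
    simp only [show ¬ ((2:Int) ≤ n) from by omega, if_false]
    rw [PySem.List.pyRange_one]
    simp only [show (n + 1 - 2).toNat = 0 from by omega]
    simp
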